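-- pv_equiv track=rewrite | github.com/FacuGarces/IP-Ex-Algo1- | Python/Parcial B.py | torneo_gallinas
-- ===== SOURCE A (Python) =====
-- def torneo_gallinas(estrategias: dict[str,str]) -> dict[str,int]:
--     res: dict = {}
--     for tupla1 in estrategias.items():
--         puntaje: int = 0
--         for tupla2 in estrategias.items():
--             if tupla1[0] != tupla2[0]:
--                 if tupla1[1] == "me la banco y no me desvio" and tupla2[1] == "me la banco y no me desvio":
--                     puntaje -= 5
--                 elif tupla1[1] == "me la banco y no me desvio" and tupla2[1] == "me desvio siempre":
--                     puntaje += 15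
--                 elif tupla1[1] == "me desvio siempre" and tupla2[1] == "me la banco y no me desvio":
--                     puntaje -= 15
--                 elif tupla1[1] == "me desvio siempre" and tupla2[1] == "me desvio siempre":
--                     puntaje -= 10
--         res[tupla1[0]] = puntaje
--     return res
-- ===== SOURCE B (Python) =====
-- BANCO = "me la banco y no me desvio"
-- DESVIO = "me desvio siempre"
--
-- def torneo_gallinas(estrategias: dict[str, str]) -> dict[str, int]:
--     # Count each strategy once, then score every player by a closed formula.
--     nb = sum(1 for v in estrategias.values() if v == BANCO)
--     nd = sum(1 for v in estrategias.values() if v == DESVIO)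
--     return {k: (-5 * (nb - 1) + 15 * nd if v == BANCO
--                 else -15 * nb - 10 * (nd - 1) if v == DESVIO
--                 else 0)
--             for k, v in estrategias.items()}
-- ===== Notes on version B (the rewrite author's own statement) =====
-- stated objective: faster
-- what changed: Replaced the all-pairs double loop with a single pass that counts each of the two strategies once and scores every player by a closed formula in the counts.
import Mathlib
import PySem

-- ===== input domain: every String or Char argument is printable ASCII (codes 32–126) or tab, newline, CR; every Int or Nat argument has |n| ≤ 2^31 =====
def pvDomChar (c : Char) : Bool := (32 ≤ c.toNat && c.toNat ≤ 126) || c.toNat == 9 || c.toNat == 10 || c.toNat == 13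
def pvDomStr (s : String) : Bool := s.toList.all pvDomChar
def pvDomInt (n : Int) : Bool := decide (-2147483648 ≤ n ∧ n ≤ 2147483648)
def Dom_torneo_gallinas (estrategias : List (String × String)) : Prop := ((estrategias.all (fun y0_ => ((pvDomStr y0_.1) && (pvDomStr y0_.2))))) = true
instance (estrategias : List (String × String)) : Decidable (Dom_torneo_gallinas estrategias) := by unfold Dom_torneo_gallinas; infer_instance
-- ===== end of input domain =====

-- B replaces A's O(n^2) all-pairs double loop by one counting pass plus a closed formula per player (faster, asymptotic).

-- ===== PORT A =====
def torneo_gallinas (estrategias : List (String × String)) : List (String × Int) :=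
  (estrategias.foldl (fun (res : PySem.Dict String Int) tupla1 =>
    let puntaje : Int := estrategias.foldl (fun (p : Int) tupla2 =>
      if tupla1.1 ≠ tupla2.1 then
        if tupla1.2 = "me la banco y no me desvio" ∧ tupla2.2 = "me la banco y no me desvio" then p - 5
        else if tupla1.2 = "me la banco y no me desvio" ∧ tupla2.2 = "me desvio siempre" then p + 15
        else if tupla1.2 = "me desvio siempre" ∧ tupla2.2 = "me la banco y no me desvio" then p - 15
        else if tupla1.2 = "me desvio siempre" ∧ tupla2.2 = "me desvio siempre" then p - 10
        else p
      else p) 0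
    res.insert tupla1.1 puntaje) PySem.Dict.empty).items

-- ===== PORT B =====
def torneo_gallinas_alt (estrategias : List (String × String)) : List (String × Int) :=
  let nb : Int := (estrategias.countP (fun t => t.2 = "me la banco y no me desvio") : Int)
  let nd : Int := (estrategias.countP (fun t => t.2 = "me desvio siempre") : Int)
  estrategias.map (fun t =>
    (t.1, if t.2 = "me la banco y no me desvio" then -5 * (nb - 1) + 15 * nd
          else if t.2 = "me desvio siempre" then -15 * nb - 10 * (nd - 1)
          else 0))

-- ===== PRECONDITION & SPEC =====
-- Pre_ requires the keys to be pairwise distinct: A's Python argument is a dict, whose keys are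
-- always distinct, so this excludes no input the Python function accepts.
def Pre_torneo_gallinas (estrategias : List (String × String)) : Prop :=
  (estrategias.map Prod.fst).Nodup
instance (estrategias : List (String × String)) : Decidable (Pre_torneo_gallinas estrategias) := by unfold Pre_torneo_gallinas; infer_instance
def pvWitness_torneo_gallinas : (List (String × String)) :=
  [("ana", "me la banco y no me desvio"), ("bob", "me desvio siempre"), ("eva", "x")]
def Spec_torneo_gallinas (estrategias : List (String × String)) (out : List (String × Int)) : Prop := out = torneo_gallinas_alt estrategias
instance (estrategias : List (String × String)) (out : List (String × Int)) : Decidable (Spec_torneo_gallinas estrategias out) := by unfold Spec_torneo_gallinas; infer_instance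

-- ===== CLAIM (what is proved, stated in full; the proofs are below) =====
def Claim_equal_torneo_gallinas : Prop := ∀ (estrategias : List (String × String)), Dom_torneo_gallinas estrategias → Pre_torneo_gallinas estrategias → Spec_torneo_gallinas estrategias (torneo_gallinas estrategias)

-- ===== LEMMAS AND PROOFS =====

-- the score one matchup contributes to the first player
def pvPts (a b : String) : Int :=
  if a = "me la banco y no me desvio" ∧ b = "me la banco y no me desvio" then -5
  else if a = "me la banco y no me desvio" ∧ b = "me desvio siempre" then 15
  else if a = "me desvio siempre" ∧ b = "me la banco y no me desvio" then -15
  else if a = "me desvio siempre" ∧ b = "me desvio siempre" then -10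
  else 0

-- A's inner loop body is "add pvPts when keys differ"
lemma pvInner_eq_add (k v : String) (l : List (String × String)) (p0 : Int) :
    l.foldl (fun (p : Int) tupla2 =>
      if k ≠ tupla2.1 then
        if v = "me la banco y no me desvio" ∧ tupla2.2 = "me la banco y no me desvio" then p - 5
        else if v = "me la banco y no me desvio" ∧ tupla2.2 = "me desvio siempre" then p + 15
        else if v = "me desvio siempre" ∧ tupla2.2 = "me la banco y no me desvio" then p - 15
        else if v = "me desvio siempre" ∧ tupla2.2 = "me desvio siempre" then p - 10
        else p
      else p) p0
    = p0 + (l.map (fun t => if k ≠ t.1 then pvPts v t.2 else 0)).sum := by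
  have h : (fun (p : Int) (tupla2 : String × String) =>
      if k ≠ tupla2.1 then
        if v = "me la banco y no me desvio" ∧ tupla2.2 = "me la banco y no me desvio" then p - 5
        else if v = "me la banco y no me desvio" ∧ tupla2.2 = "me desvio siempre" then p + 15
        else if v = "me desvio siempre" ∧ tupla2.2 = "me la banco y no me desvio" then p - 15
        else if v = "me desvio siempre" ∧ tupla2.2 = "me desvio siempre" then p - 10
        else p
      else p)
      = fun (p : Int) (t : String × String) => p + (if k ≠ t.1 then pvPts v t.2 else 0) := by
    funext p t
    simp only [pvPts]
    split_ifs <;> ring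
  rw [h, PySem.List.foldl_add]

-- drop the key-inequality filter: on nodup keys it removes exactly the self matchup
lemma pvSum_filter (l : List (String × String)) (k v : String)
    (hmem : (k, v) ∈ l) (hnd : (l.map Prod.fst).Nodup) :
    (l.map (fun t => if k ≠ t.1 then pvPts v t.2 else 0)).sum
      = (l.map (fun t => pvPts v t.2)).sum - pvPts v v := by
  induction l with
  | nil => simp at hmem
  | cons hd tl ih =>
    simp only [List.map_cons, List.nodup_cons] at hnd
    rcases List.mem_cons.mp hmem with heq | htl
    · subst heq
      simp only [List.map_cons, List.sum_cons, ne_eq, not_true_eq_false, if_false]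
      have : ∀ t ∈ tl, (if (k : String) ≠ t.1 then pvPts v t.2 else 0) = pvPts v t.2 := by
        intro t ht
        have : k ≠ t.1 := by
          intro h
          exact hnd.1 (h ▸ (List.mem_map_of_mem ht : t.1 ∈ tl.map Prod.fst))
        simp [this]
      rw [List.map_congr_left this]
      ring
    · have hk : k ≠ hd.1 := by
        intro h
        exact hnd.1 (h ▸ (List.mem_map_of_mem htl : (k, v).1 ∈ tl.map Prod.fst))
      simp only [List.map_cons, List.sum_cons, hk, ne_eq, not_false_eq_true, if_true]
      rw [ih htl hnd.2]
      ring
  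
-- total of pvPts against every entry = counts times the two per-strategy payoffs
lemma pvSum_total (l : List (String × String)) (v : String) :
    (l.map (fun t => pvPts v t.2)).sum
      = (l.countP (fun t => t.2 = "me la banco y no me desvio") : Int) * pvPts v "me la banco y no me desvio"
        + (l.countP (fun t => t.2 = "me desvio siempre") : Int) * pvPts v "me desvio siempre" := by
  induction l with
  | nil => simp
  | cons hd tl ih =>
    simp only [List.map_cons, List.sum_cons, List.countP_cons, ih]
    by_cases h1 : hd.2 = "me la banco y no me desvio"
    · simp [h1]; ring
    · by_cases h2 : hd.2 = "me desvio siempre"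
      · simp [h2]; ring
      · have : pvPts v hd.2 = 0 := by
          simp only [pvPts]
          split_ifs with a b c d <;> first | rfl | (exfalso; tauto)
        simp [h1, h2, this]

-- ===== VERDICT (by name: the statement is the Claim_ definition above) =====
theorem torneo_gallinas_spec : Claim_equal_torneo_gallinas := by
  intro l _ hpre
  unfold Spec_torneo_gallinas torneo_gallinas torneo_gallinas_alt
  rw [PySem.Dict.items_foldl_insert_fresh _ _ _ _ (by intro a _; rfl) hpre]
  simp only [PySem.Dict.empty, List.nil_append]
  apply List.map_congr_left
  intro t ht
  refine Prod.ext rfl ?_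
  simp only
  rw [pvInner_eq_add, pvSum_filter l t.1 t.2 ht hpre, pvSum_total, zero_add]
  by_cases h1 : t.2 = "me la banco y no me desvio"
  · simp [h1, pvPts]; ring
  · by_cases h2 : t.2 = "me desvio siempre"
    · simp [h2, pvPts]; ring
    · have : pvPts t.2 t.2 = 0 := by simp [pvPts, h1, h2]
      have hB : pvPts t.2 "me la banco y no me desvio" = 0 := by simp [pvPts, h1, h2]
      have hD : pvPts t.2 "me desvio siempre" = 0 := by simp [pvPts, h1, h2]
      simp [h1, h2, this, hB, hD]
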